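-- pv_equiv track=rewrite | github.com/haticekck/Mapf-SA | metrics_visualization.py | calculate_active_agents_over_time
-- ===== SOURCE A (Python) =====
-- from typing import List, Tuple, Dict
--
-- def calculate_active_agents_over_time(paths: List[List[Tuple[int, int]]]) -> Tuple[List[int], List[int]]:
--     """
--     Zamana göre aktif agent sayısını hesaplar (AUC için)
--
--     Returns:
--         (timesteps, active_agents)
--     """
--     if not paths:
--         return [], []
--
--     max_length = max(len(path) for path in paths)
--     timesteps = list(range(max_length))
--     active_agents = []
--
--     for t in range(max_length):
--         # Bu timestep'te kaç agent aktif?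
--         active = sum(1 for path in paths if t < len(path))
--         active_agents.append(active)
--
--     return timesteps, active_agents
-- ===== SOURCE B (Python) =====
-- def calculate_active_agents_over_time(paths):
--     """Histogram the path lengths once, then sweep timesteps subtracting the
--     histogram: O(n + max_length) instead of O(n * max_length)."""
--     if not paths:
--         return [], []
--     lengths = [len(p) for p in paths]
--     hist = {}
--     for L in lengths:
--         hist[L] = hist.get(L, 0) + 1
--     max_length = max(hist)
--     timesteps = []
--     active_agents = []
--     active = len(paths)
--     for t in range(max_length):
--         active -= hist.get(t, 0)
--         timesteps.append(t)
--         active_agents.append(active)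
--     return timesteps, active_agents
-- ===== Notes on version B (the rewrite author's own statement) =====
-- stated objective: faster
-- what changed: Replaces A's per-timestep scan of all paths by a one-pass length histogram and a running suffix subtraction over timesteps.
import Mathlib
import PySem

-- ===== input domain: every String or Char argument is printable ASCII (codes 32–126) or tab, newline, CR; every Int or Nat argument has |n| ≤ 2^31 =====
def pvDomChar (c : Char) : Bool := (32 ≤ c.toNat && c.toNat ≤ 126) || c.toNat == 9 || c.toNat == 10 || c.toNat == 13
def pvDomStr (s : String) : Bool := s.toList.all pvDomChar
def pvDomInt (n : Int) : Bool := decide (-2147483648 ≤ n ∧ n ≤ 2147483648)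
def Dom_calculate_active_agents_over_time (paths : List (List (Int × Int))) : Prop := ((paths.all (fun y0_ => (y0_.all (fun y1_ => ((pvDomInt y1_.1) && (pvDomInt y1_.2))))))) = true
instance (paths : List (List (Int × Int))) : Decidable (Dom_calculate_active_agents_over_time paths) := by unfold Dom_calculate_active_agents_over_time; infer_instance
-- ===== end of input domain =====

-- B replaces A's per-timestep scan of all paths by a one-pass length histogram
-- plus a running subtraction over the timesteps (objective: faster).

-- ===== PORT A =====
def calculate_active_agents_over_time (paths : List (List (Int × Int))) : List Int × List Int :=
  if paths = [] then ([], [])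
  else
    let max_length : Int := (PySem.List.max? (paths.map (fun p => (p.length : Int))) (fun y => y)).getD 0
    let timesteps := PySem.List.pyRange 0 max_length 1
    let active_agents := (PySem.List.pyRange 0 max_length 1).foldl
      (fun acc t => acc ++ [(paths.map (fun p => if t < (p.length : Int) then (1 : Int) else 0)).sum]) []
    (timesteps, active_agents)

-- ===== PORT B =====
def calculate_active_agents_over_time_alt (paths : List (List (Int × Int))) : List Int × List Int :=
  if paths = [] then ([], [])
  else
    let lengths := paths.map (fun p => (p.length : Int))
    let hist := lengths.foldl (fun d L => d.insert L (d.getD L 0 + 1)) PySem.Dict.empty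
    let max_length : Int := (PySem.List.max? hist.keys (fun y => y)).getD 0
    let st := (PySem.List.pyRange 0 max_length 1).foldl
      (fun (st : List Int × List Int × Int) t =>
        let active := st.2.2 - hist.getD t 0
        (st.1 ++ [t], (st.2.1 ++ [active], active)))
      ([], ([], (paths.length : Int)))
    (st.1, st.2.1)

-- ===== PRECONDITION & SPEC =====
def Spec_calculate_active_agents_over_time (paths : List (List (Int × Int))) (out : List Int × List Int) : Prop := out = calculate_active_agents_over_time_alt paths
instance (paths : List (List (Int × Int))) (out : List Int × List Int) : Decidable (Spec_calculate_active_agents_over_time paths out) := by unfold Spec_calculate_active_agents_over_time; infer_instance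

-- ===== CLAIM (what is proved, stated in full; the proofs are below) =====
def Claim_equal_calculate_active_agents_over_time : Prop := ∀ (paths : List (List (Int × Int))), Dom_calculate_active_agents_over_time paths → Spec_calculate_active_agents_over_time paths (calculate_active_agents_over_time paths)

-- ===== LEMMAS AND PROOFS =====

-- removing the paths of length exactly `a` from those still active at `a-1` leaves those active at `a`
theorem pv_step (xs : List Int) (a : Int) :
    ((xs.countP (fun L => decide (a - 1 < L))) : Int) - (xs.count a : Int)
      = ((xs.countP (fun L => decide (a < L))) : Int) := by
  induction xs with
  | nil => simp
  | cons x t ih =>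
    simp only [List.countP_cons, List.count_cons]
    push_cast
    split_ifs <;> simp only [beq_iff_eq, decide_eq_true_eq] at * <;> omega

-- max over the distinct elements equals max over the list
theorem pv_max_eq (xs : List Int) (h : xs ≠ []) :
    (PySem.List.max? (PySem.Set.ofList xs) (fun y => y)).getD 0
      = (PySem.List.max? xs (fun y => y)).getD 0 := by
  obtain ⟨x, hx⟩ := List.exists_mem_of_ne_nil xs h
  have hS : (PySem.Set.ofList xs : List Int) ≠ [] :=
    List.ne_nil_of_mem ((PySem.Set.mem_ofList _ _).mpr hx)
  cases hA : PySem.List.max? xs (fun y => y) with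
  | none => exact absurd ((PySem.List.max?_eq_none_iff xs (fun y => y)).mp hA) h
  | some mA =>
    cases hB : PySem.List.max? (PySem.Set.ofList xs) (fun y => y) with
    | none => exact absurd ((PySem.List.max?_eq_none_iff (PySem.Set.ofList xs) (fun y => y)).mp hB) hS
    | some mB =>
      have h1 : mA ∈ xs := PySem.List.max?_mem hA
      have h2 : mB ∈ (PySem.Set.ofList xs : List Int) := PySem.List.max?_mem hB
      have h3 := PySem.List.max?_isMax hA
      have h4 := PySem.List.max?_isMax hB
      simp only [Option.getD_some]
      exact le_antisymm (h3 mB ((PySem.Set.mem_ofList _ _).mp h2)) (h4 mA ((PySem.Set.mem_ofList _ _).mpr h1))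

-- A's append-accumulator loop is a map
theorem pv_foldA (f : Int → Int) (l : List Int) : ∀ (init : List Int),
    l.foldl (fun acc t => acc ++ [f t]) init = init ++ l.map f := by
  induction l with
  | nil => intro init; simp
  | cons x t ih => intro init; simp [List.foldl_cons, ih]

-- B's suffix-subtraction sweep, with its running-count invariant
theorem pv_loopB (xs : List Int) (M : Int) :
    ∀ (n : Nat) (a b : Int) (ts as : List Int), (M - a).toNat = n → b = a - 1 →
    (PySem.List.pyRange a M 1).foldl
      (fun (st : List Int × List Int × Int) t =>
        (st.1 ++ [t], (st.2.1 ++ [st.2.2 - (xs.count t : Int)], st.2.2 - (xs.count t : Int))))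
      (ts, (as, ((xs.countP (fun L => decide (b < L))) : Int)))
    = (ts ++ PySem.List.pyRange a M 1,
       (as ++ (PySem.List.pyRange a M 1).map (fun t => ((xs.countP (fun L => decide (t < L))) : Int)),
        ((xs.countP (fun L => decide (max b (M - 1) < L))) : Int))) := by
  intro n
  induction n with
  | zero =>
    intro a b ts as hn hb
    have hMa : M ≤ a := by omega
    have hmax : max b (M - 1) = b := by omega
    rw [PySem.List.pyRange_one_eq_nil hMa, hmax]
    simp
  | succ n ih =>
    intro a b ts as hn hb
    have hlt : a < M := by omega
    rw [PySem.List.pyRange_one_cons hlt]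
    simp only [List.foldl_cons, List.map_cons]
    have hstep : ((xs.countP (fun L => decide (b < L))) : Int) - (xs.count a : Int)
        = ((xs.countP (fun L => decide (a < L))) : Int) := by
      subst hb; exact pv_step xs a
    rw [hstep]
    rw [ih (a + 1) a (ts ++ [a]) (as ++ [((xs.countP (fun L => decide (a < L))) : Int)]) (by omega) (by omega)]
    have hmax2 : max a (M - 1) = max b (M - 1) := by omega
    rw [hmax2]
    simp

-- A's per-timestep 0/1-sum counts the still-active paths
theorem pv_sum (l : List (List (Int × Int))) (t : Int) :
    (l.map (fun p => if t < (p.length : Int) then (1 : Int) else 0)).sum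
      = ((l.countP (fun p => decide (t < (p.length : Int)))) : Int) := by
  induction l with
  | nil => simp
  | cons q qs ih =>
    simp only [List.map_cons, List.sum_cons, List.countP_cons, ih]
    by_cases hq : t < (q.length : Int) <;> simp [hq] <;> push_cast <;> omega

theorem pv_main (paths : List (List (Int × Int))) :
    calculate_active_agents_over_time paths = calculate_active_agents_over_time_alt paths := by
  by_cases h : paths = []
  · subst h; rfl
  · have hxs : paths.map (fun p => (p.length : Int)) ≠ [] := by simpa using h
    simp only [calculate_active_agents_over_time, calculate_active_agents_over_time_alt,
      if_neg h, PySem.Dict.foldl_insert_getD_add_one_eq_counter, PySem.Dict.getD_counter,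
      PySem.Dict.keys_counter]
    rw [pv_max_eq _ hxs]
    rw [pv_foldA (fun t => (paths.map (fun p => if t < (p.length : Int) then (1 : Int) else 0)).sum)]
    have hinit : ((paths.length : Int))
        = (((paths.map (fun p => (p.length : Int))).countP (fun L => decide ((-1 : Int) < L))) : Int) := by
      rw [List.countP_map]
      have hall : ∀ q ∈ paths, ((fun L => decide ((-1 : Int) < L)) ∘ fun p => ((p.length : Int))) q = true := by
        intro q _
        simp only [Function.comp_apply, decide_eq_true_eq]
        omega
      rw [List.countP_eq_length.mpr hall]
      try simp
    rw [hinit]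
    rw [pv_loopB (paths.map (fun p => (p.length : Int)))
        ((PySem.List.max? (paths.map (fun p => (p.length : Int))) (fun y => y)).getD 0)
        (((PySem.List.max? (paths.map (fun p => (p.length : Int))) (fun y => y)).getD 0 - 0).toNat)
        0 (-1) [] [] rfl (by omega)]
    have hfun : (fun t : Int => (paths.map (fun p => if t < (p.length : Int) then (1 : Int) else 0)).sum)
        = (fun t : Int => (((paths.map (fun p => (p.length : Int))).countP (fun L => decide (t < L))) : Int)) := by
      funext t
      rw [pv_sum, List.countP_map]
      rfl
    rw [hfun]
    simp

-- ===== VERDICT (by name: the statement is the Claim_ definition above) =====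
theorem calculate_active_agents_over_time_spec : Claim_equal_calculate_active_agents_over_time := by
  intro paths _
  exact (pv_main paths).symm ▸ rfl
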